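-- pv_equiv track=rewrite | github.com/afmireski/binary-converter | python-converter/binary-converter.py | convert_int_to_binary_excess_127
-- ===== SOURCE A (Python) =====
-- def convert_int_to_binary_excess_127(number: int) -> str:
--     if -127 <= number <= 128:
--         excess_value: int = number + 127
--
--         max_value: int = 128  # max_value: int = 128
--         value: int = excess_value
--
--         result: str = ''
--         while value > 0:
--             if value >= max_value:
--                 result += '1'
--                 value -= max_value
--             else:
--                 result += '0'
--             max_value = max_value // 2
--
--         while len(result) < 8:
--             result += '0'
--
--         return result
--     else:
--         return '00000000'
-- ===== SOURCE B (Python) =====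
-- def convert_int_to_binary_excess_127(number: int) -> str:
--     if -127 <= number <= 128:
--         return format(number + 127, '08b')
--     else:
--         return '00000000'
-- ===== Notes on version B (the rewrite author's own statement) =====
-- stated objective: idiomatic
-- what changed: Replaced the greedy subtractive bit loop and trailing zero-padding loop with a direct 8-bit formatting of number+127 (format(excess,'08b')), valid since the excess is always 0..255.
import Mathlib
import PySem

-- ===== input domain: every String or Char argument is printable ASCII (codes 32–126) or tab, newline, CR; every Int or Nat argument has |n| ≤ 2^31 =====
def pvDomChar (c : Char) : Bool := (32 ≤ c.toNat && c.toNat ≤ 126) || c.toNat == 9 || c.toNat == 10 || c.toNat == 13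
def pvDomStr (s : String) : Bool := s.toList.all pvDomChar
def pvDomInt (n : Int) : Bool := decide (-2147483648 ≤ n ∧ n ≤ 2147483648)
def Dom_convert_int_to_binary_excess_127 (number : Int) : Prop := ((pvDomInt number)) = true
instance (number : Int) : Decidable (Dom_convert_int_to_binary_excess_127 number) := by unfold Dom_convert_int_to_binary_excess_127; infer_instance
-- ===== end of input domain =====

-- B replaces A's greedy subtractive bit loop and padding loop with direct 8-bit formatting of number+127 (idiomatic, same cost).


-- ===== PORT A =====
-- while loop of A: fuel 9 suffices (max_value halves 128,64,...,1,0: the loop runs at most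
-- 8 times before value reaches 0 for any excess in 0..255, which the guard ensures)
def pvLoopA : Nat → Int → Int → List Char → List Char
  | 0, _, _, result => result
  | fuel+1, value, max_value, result =>
    if value > 0 then
      if value ≥ max_value then
        pvLoopA fuel (value - max_value) (PySem.Int.floordiv max_value 2) (result ++ ['1'])
      else
        pvLoopA fuel value (PySem.Int.floordiv max_value 2) (result ++ ['0'])
    else result

-- while len(result) < 8: result += '0'
def pvPadA : Nat → List Char → List Char
  | 0, result => result
  | fuel+1, result =>
    if result.length < 8 then pvPadA fuel (result ++ ['0']) else result

def convert_int_to_binary_excess_127 (number : Int) : String :=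
  if -127 ≤ number ∧ number ≤ 128 then
    String.mk (pvPadA 8 (pvLoopA 9 (number + 127) 128 []))
  else "00000000"

-- ===== PORT B =====
-- format(excess, '08b') ported as base-2 digits (Nat.toDigits) left-padded to width 8
def convert_int_to_binary_excess_127_alt (number : Int) : String :=
  if -127 ≤ number ∧ number ≤ 128 then
    let digits := Nat.toDigits 2 (number + 127).toNat
    String.mk (List.replicate (8 - digits.length) '0' ++ digits)
  else "00000000"

-- ===== PRECONDITION & SPEC =====
def Spec_convert_int_to_binary_excess_127 (number : Int) (out : String) : Prop := out = convert_int_to_binary_excess_127_alt number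
instance (number : Int) (out : String) : Decidable (Spec_convert_int_to_binary_excess_127 number out) := by unfold Spec_convert_int_to_binary_excess_127; infer_instance

-- ===== CLAIM (what is proved, stated in full; the proofs are below) =====
def Claim_equal_convert_int_to_binary_excess_127 : Prop := ∀ (number : Int), Dom_convert_int_to_binary_excess_127 number → Spec_convert_int_to_binary_excess_127 number (convert_int_to_binary_excess_127 number)

-- ===== LEMMAS AND PROOFS =====

-- ===== VERDICT (by name: the statement is the Claim_ definition above) =====
theorem convert_int_to_binary_excess_127_spec : Claim_equal_convert_int_to_binary_excess_127 := by
  intro number hdom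
  unfold Spec_convert_int_to_binary_excess_127
  unfold convert_int_to_binary_excess_127 convert_int_to_binary_excess_127_alt
  by_cases h : -127 ≤ number ∧ number ≤ 128
  · simp only [if_pos h]
    obtain ⟨h1, h2⟩ := h
    interval_cases number <;> rfl
  · simp only [if_neg h]
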